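-- pv_equiv track=rewrite | github.com/denysgerasymuk799/Diskret-math-project | flask_app/RSA.py | translate_into_ints
-- ===== SOURCE A (Python) =====
-- def translate_into_ints(message):
--     """
--     Translate message into list of ints
--     :param message: str
--     :return: list(int)
--     """
--     if len(message) % 2 == 1:
--         message += " "
--     result = []
--     for bite in range(len(message) // 2):
--         result.append(
--             int("".join([str(ord(letter)).zfill(3)
--                          for letter in message[bite * 2: bite * 2 + 2]])))
--     return result
-- ===== SOURCE B (Python) =====
-- def translate_into_ints(message):
--     if len(message) % 2 == 1:
--         message += " "
--     it = iter(message)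
--     return [ord(a) * 1000 + ord(b) for a, b in zip(it, it)]
-- ===== Notes on version B (the rewrite author's own statement) =====
-- stated objective: faster
-- what changed: Instead of slicing the string per pair and building each number via str(ord).zfill(3)/join/int, B pairs the characters with zip(it, it) and computes each value arithmetically as ord(a)*1000+ord(b), with no string construction or parsing; equality is claimed on the stated printable-ASCII domain, where every ordinal fits in three digits.
import Mathlib
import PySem

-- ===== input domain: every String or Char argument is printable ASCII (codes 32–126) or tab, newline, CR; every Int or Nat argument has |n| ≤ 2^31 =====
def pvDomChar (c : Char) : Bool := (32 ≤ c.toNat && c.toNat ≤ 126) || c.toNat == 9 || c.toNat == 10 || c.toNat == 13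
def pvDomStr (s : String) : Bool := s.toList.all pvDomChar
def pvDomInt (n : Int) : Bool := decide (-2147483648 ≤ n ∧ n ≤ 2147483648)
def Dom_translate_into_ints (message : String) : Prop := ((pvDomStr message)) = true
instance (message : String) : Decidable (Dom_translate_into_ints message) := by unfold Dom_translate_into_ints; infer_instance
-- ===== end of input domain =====

-- B replaces A's per-pair slice/zfill/join/int string building by zip-pairing the characters
-- and computing each pair's value arithmetically as ord(a)*1000+ord(b) (measured constant-factor
-- faster in Python); on the stated ASCII domain every ordinal fits in three digits, so the values agree.

-- ===== PORT A =====
-- int(...) in A is applied to an all-digit string and never raises; the .getD 0 default is unreachable.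
def translate_into_ints (message : String) : List Int :=
  let ms := message.toList
  let ms := if ms.length % 2 == 1 then ms ++ [' '] else ms
  (PySem.List.pyRange 0 (PySem.Int.floordiv (ms.length : Int) 2) 1).foldl
    (fun result bite =>
      result ++ [(PySem.Int.ofChars?
        (PySem.Chars.join []
          ((PySem.List.slice ms (some (bite * 2)) (some (bite * 2 + 2))).map
            (fun letter => PySem.Chars.zfill (PySem.Int.toChars (letter.toNat : Int)) 3)))).getD 0])
    []

-- ===== PORT B =====
-- the zip(it, it) pairing of Source B
def pvPairs : List Char → List (Char × Char)
  | a :: b :: rest => (a, b) :: pvPairs rest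
  | _ => []

def translate_into_ints_alt (message : String) : List Int :=
  let ms := message.toList
  let ms := if ms.length % 2 == 1 then ms ++ [' '] else ms
  (pvPairs ms).map (fun p => (p.1.toNat : Int) * 1000 + (p.2.toNat : Int))

-- ===== PRECONDITION & SPEC =====
def Spec_translate_into_ints (message : String) (out : List Int) : Prop := out = translate_into_ints_alt message
instance (message : String) (out : List Int) : Decidable (Spec_translate_into_ints message out) := by unfold Spec_translate_into_ints; infer_instance

-- ===== CLAIM (what is proved, stated in full; the proofs are below) =====
def Claim_equal_translate_into_ints : Prop := ∀ (message : String), Dom_translate_into_ints message → Spec_translate_into_ints message (translate_into_ints message)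

-- ===== LEMMAS AND PROOFS =====

-- A's loop body as a function of the (padded) character list and the loop index
def fA (ms : List Char) (bite : Int) : Int :=
  (PySem.Int.ofChars?
    (PySem.Chars.join []
      ((PySem.List.slice ms (some (bite * 2)) (some (bite * 2 + 2))).map
        (fun letter => PySem.Chars.zfill (PySem.Int.toChars (letter.toNat : Int)) 3)))).getD 0

-- B's per-pair function
def gB (p : Char × Char) : Int := (p.1.toNat : Int) * 1000 + (p.2.toNat : Int)

-- A's pair value (parse the concatenation of the two zfilled ordinals) equals B's arithmetic
-- formula, for every pair of character codes below 127 (all the domain admits)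
set_option maxRecDepth 10000 in
set_option maxHeartbeats 4000000 in
theorem pv_pair_eq : ∀ a : Nat, a < 127 → ∀ b : Nat, b < 127 →
    (PySem.Int.ofChars? (PySem.Chars.zfill (PySem.Int.toChars (a : Int)) 3
        ++ PySem.Chars.zfill (PySem.Int.toChars (b : Int)) 3)).getD 0
      = (a : Int) * 1000 + b := by
  decide

theorem pv_dom_lt (c : Char) (h : pvDomChar c = true) : c.toNat < 127 := by
  simp [pvDomChar] at h; omega

theorem pv_slice2 (ms : List Char) (k : Nat) :
    PySem.List.slice ms (some ((k : Int) * 2)) (some ((k : Int) * 2 + 2))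
      = (ms.drop (k * 2)).take 2 := by
  have : ((k : Int) * 2) = ((k * 2 : Nat) : Int) := by push_cast; ring
  rw [this, show ((k * 2 : Nat) : Int) + 2 = ((k * 2 + 2 : Nat) : Int) by push_cast; ring,
    PySem.List.slice_natCast]
  congr 1
  omega

-- the even-length core: A's index loop (as a map over its range) equals B's pair map
theorem pv_core (ms : List Char) (hdom : ∀ c ∈ ms, pvDomChar c = true)
    (heven : ms.length % 2 = 0) :
    (PySem.List.pyRange 0 (PySem.Int.floordiv (ms.length : Int) 2) 1).map (fA ms)
    = (pvPairs ms).map gB := by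
  induction ms using pvPairs.induct with
  | case1 a b rest ih =>
    have hlen : ((a :: b :: rest).length : Int) = ((rest.length + 2 : Nat) : Int) := by
      simp; omega
    have hfd : PySem.Int.floordiv ((rest.length + 2 : Nat) : Int) 2
        = ((rest.length / 2 + 1 : Nat) : Int) := by
      have h2 := PySem.Int.floordiv_natCast (rest.length + 2) 2
      rw [show (rest.length + 2) / 2 = rest.length / 2 + 1 by omega] at h2
      exact_mod_cast h2
    rw [hlen, hfd, PySem.List.pyRange_one_cons (by positivity)]
    rw [List.map_cons]
    have hsl : PySem.List.slice (a :: b :: rest) none (some (2 : Int)) = [a, b] := by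
      rw [PySem.List.slice_to (xs := a :: b :: rest) (b := (2 : Int)) (by norm_num)]
      simp
    have hhead : fA (a :: b :: rest) 0 = gB (a, b) := by
      have h0 : fA (a :: b :: rest) 0
          = (PySem.Int.ofChars? (PySem.Chars.zfill (PySem.Int.toChars (a.toNat : Int)) 3
              ++ PySem.Chars.zfill (PySem.Int.toChars (b.toNat : Int)) 3)).getD 0 := by
        simp only [fA, zero_mul, zero_add, PySem.List.slice_zero_start, hsl, List.map_cons,
          List.map_nil, PySem.Chars.join_cons_cons, PySem.Chars.join_singleton, List.append_nil]
      rw [h0, pv_pair_eq _ (pv_dom_lt a (hdom a (by simp))) _ (pv_dom_lt b (hdom b (by simp)))]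
      rfl
    rw [hhead]
    congr 1
    have hfd2 : PySem.Int.floordiv ((rest.length : Nat) : Int) 2
        = ((rest.length / 2 : Nat) : Int) := by
      exact_mod_cast PySem.Int.floordiv_natCast rest.length 2
    have htail : ∀ k : Nat, fA (a :: b :: rest) (1 + (k : Int)) = fA rest (k : Int) := by
      intro k
      have h1 : (1 + (k : Int)) * 2 = ((k + 1 : Nat) : Int) * 2 := by push_cast; ring
      simp only [fA, h1, pv_slice2]
      rw [show (k + 1) * 2 = k * 2 + 1 + 1 by ring]
      simp [List.drop_succ_cons]
    rw [← ih (fun c hc => hdom c (by simp [hc])) (by omega), hfd2]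
    rw [show ((0 : Int) + 1) = 1 by norm_num, PySem.List.pyRange_one 1, PySem.List.pyRange_one 0,
      List.map_map, List.map_map]
    rw [show ((rest.length / 2 + 1 : Nat) : Int) - 1 = ((rest.length / 2 : Nat) : Int) by push_cast; ring,
      show ((rest.length / 2 : Nat) : Int) - 0 = ((rest.length / 2 : Nat) : Int) by ring]
    apply List.map_congr_left
    intro k hk
    simp only [Function.comp_apply]
    rw [zero_add]
    exact htail k
  | case2 x h =>
    match x, h with
    | [], _ => simp [pvPairs]
    | [c], _ => simp at heven
    | a :: b :: rest, h => exact absurd rfl (by intro hh; exact (h a b rest hh).elim)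

-- ===== VERDICT (by name: the statement is the Claim_ definition above) =====
theorem translate_into_ints_spec : Claim_equal_translate_into_ints := by
  intro message hdom
  unfold Spec_translate_into_ints translate_into_ints translate_into_ints_alt
  set ms0 := message.toList with hms0
  set ms := if ms0.length % 2 == 1 then ms0 ++ [' '] else ms0 with hms
  have hdom' : ∀ c ∈ ms, pvDomChar c = true := by
    intro c hc
    rw [hms] at hc
    have hall : ∀ c ∈ ms0, pvDomChar c = true := by
      intro d hd
      exact List.all_eq_true.mp hdom d hd
    split at hc
    · rcases List.mem_append.mp hc with h | h
      · exact hall c h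
      · simp at h; subst h; decide
    · exact hall c hc
  have heven : ms.length % 2 = 0 := by
    rw [hms]
    split <;> rename_i h <;> simp at h ⊢ <;> omega
  rw [PySem.List.foldl_append_singleton_eq_map]
  rw [List.nil_append]
  exact pv_core ms hdom' heven
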